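-- pv_equiv track=rewrite | github.com/Zach-hammad/repotoire | repotoire/detectors/unused_imports_detector.py | _is_referenced
-- ===== SOURCE A (Python) =====
-- from typing import Any, Dict, List, Optional, Set
--
-- def _is_referenced(imported: str, referenced: Set[str]) -> bool:
--     """Check if an imported module is referenced.
--
--     Handles both exact matches and prefix matches (for module imports
--     where we use a submodule/function).
--
--     Args:
--         imported: The imported module/entity qualified name
--         referenced: Set of all referenced qualified names
--
--     Returns:
--         True if the import is used somewhere
--     """
--     # Exact match
--     if imported in referenced:
--         return True
--
--     # Check if any referenced entity starts with this import
--     # (e.g., import foo, use foo.bar)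
--     for ref in referenced:
--         if ref.startswith(imported + "."):
--             return True
--
--     # Check if this import is a sub-path of something referenced
--     # (e.g., from foo.bar import baz, and foo.bar is referenced)
--     parts = imported.split(".")
--     for i in range(1, len(parts)):
--         prefix = ".".join(parts[:i])
--         if prefix in referenced:
--             return True
--
--     return False
-- ===== SOURCE B (Python) =====
-- def _is_referenced(imported, referenced):
--     """Single pass over `referenced`: exact match, forward-prefix match, or
--     reverse dotted-prefix match (replaces building every dotted prefix of
--     `imported` and testing set membership)."""
--     for ref in referenced:
--         if imported == ref or ref.startswith(imported + ".") or imported.startswith(ref + "."):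
--             return True
--     return False
-- ===== Notes on version B (the rewrite author's own statement) =====
-- stated objective: simpler
-- what changed: Fuses A's three passes (set membership, startswith scan, and a loop that joins every dotted prefix of `imported` and tests set membership) into one scan of `referenced` whose third disjunct is a reverse startswith test, so no prefix strings are ever built.
import Mathlib
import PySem

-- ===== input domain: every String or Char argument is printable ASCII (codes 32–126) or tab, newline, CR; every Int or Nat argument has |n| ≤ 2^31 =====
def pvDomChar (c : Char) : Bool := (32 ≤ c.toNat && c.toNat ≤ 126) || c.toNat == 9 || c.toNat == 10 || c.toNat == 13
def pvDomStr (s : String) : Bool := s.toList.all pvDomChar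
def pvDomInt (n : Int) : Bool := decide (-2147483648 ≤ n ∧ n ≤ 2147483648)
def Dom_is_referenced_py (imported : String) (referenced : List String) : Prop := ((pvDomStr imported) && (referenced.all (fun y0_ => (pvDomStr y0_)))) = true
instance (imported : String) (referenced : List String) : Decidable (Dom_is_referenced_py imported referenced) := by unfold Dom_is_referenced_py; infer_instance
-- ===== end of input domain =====

-- B fuses A's three passes (set membership, startswith scan, dotted-prefix build + membership)
-- into one scan of `referenced` with a reverse startswith test; objective: simpler.


-- ===== PORT A =====
-- `referenced` is a Python set → List String of distinct elements; `in` is membership.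
-- `imported.split(".")` : PySem has no Str.splitOn, so we port it exactly through
-- Chars.splitOn on the code points (exact for a non-empty separator).
def is_referenced_py (imported : String) (referenced : List String) : Bool :=
  if referenced.contains imported then true
  else if referenced.any (fun ref => PySem.Str.startswith ref (imported ++ ".")) then true
  else
    let parts : List String := (PySem.Chars.splitOn imported.toList ['.']).map String.ofList
    (PySem.List.pyRange 1 parts.length).any (fun i =>
      referenced.contains (PySem.Str.join "." (PySem.List.slice parts none (some i))))

-- ===== PORT B =====
def is_referenced_py_alt (imported : String) (referenced : List String) : Bool :=
  referenced.any (fun ref =>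
    imported == ref
      || PySem.Str.startswith ref (imported ++ ".")
      || PySem.Str.startswith imported (ref ++ "."))

-- ===== PRECONDITION & SPEC =====
def Spec_is_referenced_py (imported : String) (referenced : List String) (out : Bool) : Prop := out = is_referenced_py_alt imported referenced
instance (imported : String) (referenced : List String) (out : Bool) : Decidable (Spec_is_referenced_py imported referenced out) := by unfold Spec_is_referenced_py; infer_instance

-- ===== CLAIM (what is proved, stated in full; the proofs are below) =====
def Claim_equal_is_referenced_py : Prop := ∀ (imported : String) (referenced : List String), Dom_is_referenced_py imported referenced → Spec_is_referenced_py imported referenced (is_referenced_py imported referenced)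

-- ===== LEMMAS AND PROOFS =====

-- Structural version of CPython's str.split(".") on code points.
def mySplit : List Char → List (List Char)
  | [] => [[]]
  | c :: t => if c = '.' then [] :: mySplit t else (mySplit t).modifyHead (c :: ·)

theorem mySplit_dot (t : List Char) : mySplit ('.' :: t) = [] :: mySplit t := by
  simp [mySplit]

theorem mySplit_cons {c : Char} (t : List Char) (hc : c ≠ '.') :
    mySplit (c :: t) = (mySplit t).modifyHead (c :: ·) := by
  simp [mySplit, hc]

theorem mySplit_ne_nil (s : List Char) : mySplit s ≠ [] := by
  induction s with
  | nil => simp [mySplit]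
  | cons c t ih =>
    simp only [mySplit]
    split
    · simp
    · cases h : mySplit t with
      | nil => exact absurd h ih
      | cons a l => simp [List.modifyHead]

theorem mySplit_length_pos (s : List Char) : 1 ≤ (mySplit s).length :=
  List.length_pos_of_ne_nil (mySplit_ne_nil s)

theorem go_eq_mySplit (s : List Char) : ∀ (fuel : Nat) (cur : List Char) (acc : List (List Char)),
    s.length ≤ fuel →
    PySem.Chars.splitOn.go ['.'] fuel s cur acc
      = acc.reverse ++ (mySplit s).modifyHead (cur.reverse ++ ·) := by
  induction s with
  | nil =>
    intro fuel cur acc _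
    cases fuel <;> simp [PySem.Chars.splitOn.go, mySplit, List.modifyHead]
  | cons c t ih =>
    intro fuel cur acc hf
    cases fuel with
    | zero => simp at hf
    | succ f =>
      by_cases hc : c = '.'
      · subst hc
        rw [show PySem.Chars.splitOn.go ['.'] (f+1) ('.' :: t) cur acc
              = PySem.Chars.splitOn.go ['.'] f t [] (cur.reverse :: acc) from by
            simp [PySem.Chars.splitOn.go, List.isPrefixOf]]
        rw [ih f [] (cur.reverse :: acc) (by simpa using Nat.lt_succ_iff.mp (by simpa using hf))]
        simp only [mySplit_dot, List.reverse_cons, List.append_assoc]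
        cases h : mySplit t with
        | nil => exact absurd h (mySplit_ne_nil t)
        | cons a l => simp [List.modifyHead]
      · rw [show PySem.Chars.splitOn.go ['.'] (f+1) (c :: t) cur acc
              = PySem.Chars.splitOn.go ['.'] f t (c :: cur) acc from by
            simp only [PySem.Chars.splitOn.go, List.isPrefixOf, Bool.and_eq_true]
            split
            · next hp =>
                exfalso
                simp at hp
                exact hc hp.symm
            · rfl]
        rw [ih f (c :: cur) acc (by simpa using Nat.lt_succ_iff.mp (by simpa using hf))]
        rw [mySplit_cons t hc]
        cases h : mySplit t with
        | nil => exact absurd h (mySplit_ne_nil t)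
        | cons h' t' => simp [List.modifyHead]

theorem splitOn_eq_mySplit (s : List Char) : PySem.Chars.splitOn s ['.'] = mySplit s := by
  unfold PySem.Chars.splitOn
  rw [go_eq_mySplit s (s.length + 1) [] [] (by omega)]
  cases h : mySplit s with
  | nil => exact absurd h (mySplit_ne_nil s)
  | cons a l => simp [List.modifyHead]

-- join helpers
theorem join_dot_nil_cons (P : List (List Char)) (hP : P ≠ []) :
    PySem.Chars.join ['.'] ([] :: P) = '.' :: PySem.Chars.join ['.'] P := by
  cases P with
  | nil => exact absurd rfl hP
  | cons a l => rw [PySem.Chars.join_cons_cons]; simp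

theorem join_dot_modifyHead (c : Char) (P : List (List Char)) (hP : P ≠ []) :
    PySem.Chars.join ['.'] (P.modifyHead (c :: ·)) = c :: PySem.Chars.join ['.'] P := by
  cases P with
  | nil => exact absurd rfl hP
  | cons a l =>
    cases l with
    | nil => simp [List.modifyHead, PySem.Chars.join_singleton]
    | cons b l' =>
      simp only [List.modifyHead, PySem.Chars.join_cons_cons]
      simp

theorem take_ne_nil {α : Type} (P : List α) (n : Nat) (hP : P ≠ []) (hn : 1 ≤ n) :
    P.take n ≠ [] := by
  simp [List.take_eq_nil_iff]
  exact ⟨by omega, hP⟩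

theorem toList_app_dot (a : String) : (a ++ ".").toList = a.toList ++ ['.'] := by simp

-- prefix shapes
theorem prefix_dot_cons (t r : List Char) :
    (r ++ ['.'] <+: '.' :: t) ↔ (r = [] ∨ ∃ r', r = '.' :: r' ∧ r' ++ ['.'] <+: t) := by
  cases r with
  | nil => simp [List.cons_prefix_cons]
  | cons c r' =>
    simp only [List.cons_append, List.cons_prefix_cons]
    constructor
    · rintro ⟨rfl, h⟩; exact Or.inr ⟨r', rfl, h⟩
    · rintro (h | ⟨r'', heq, h⟩)
      · exact absurd h (by simp)
      · cases heq; exact ⟨rfl, h⟩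

theorem prefix_ne_cons {c : Char} (t r : List Char) (hc : c ≠ '.') :
    (r ++ ['.'] <+: c :: t) ↔ ∃ r', r = c :: r' ∧ r' ++ ['.'] <+: t := by
  cases r with
  | nil =>
    simp only [List.nil_append, List.cons_prefix_cons]
    constructor
    · rintro ⟨h, -⟩; exact absurd h.symm hc
    · rintro ⟨r', h, -⟩; exact absurd h (by simp)
  | cons c' r' =>
    simp only [List.cons_append, List.cons_prefix_cons]
    constructor
    · rintro ⟨rfl, h⟩; exact ⟨r', rfl, h⟩
    · rintro ⟨r'', heq, h⟩; cases heq; exact ⟨rfl, h⟩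

-- the key characterisation: dotted proper prefixes of s are exactly the joins of
-- initial segments of mySplit s
theorem key (s : List Char) : ∀ (r : List Char),
    (r ++ ['.'] <+: s)
      ↔ ∃ n : Nat, 1 ≤ n ∧ n < (mySplit s).length
          ∧ r = PySem.Chars.join ['.'] ((mySplit s).take n) := by
  induction s with
  | nil =>
    intro r
    constructor
    · intro h
      have := h.length_le; simp at this
    · rintro ⟨n, h1, h2, -⟩
      simp [mySplit] at h2; omega
  | cons c t ih =>
    intro r
    by_cases hc : c = '.'
    · subst hc
      rw [prefix_dot_cons]
      constructor
      · rintro (rfl | ⟨r', rfl, h⟩)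
        · refine ⟨1, le_rfl, ?_, ?_⟩
          · rw [mySplit_dot]
            have := mySplit_length_pos t
            simp; omega
          · rw [mySplit_dot, List.take_succ_cons, List.take_zero,
              PySem.Chars.join_singleton]
        · obtain ⟨n, h1, h2, rfl⟩ := (ih r').mp h
          refine ⟨n + 1, by omega, ?_, ?_⟩
          · rw [mySplit_dot]; simp; omega
          · rw [mySplit_dot, List.take_succ_cons,
              join_dot_nil_cons _ (take_ne_nil _ n (mySplit_ne_nil t) h1)]
      · rintro ⟨n, h1, h2, rfl⟩
        rw [mySplit_dot] at h2 ⊢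
        match n, h1 with
        | 1, _ =>
          left
          rw [List.take_succ_cons, List.take_zero, PySem.Chars.join_singleton]
        | (m+2), _ =>
          right
          refine ⟨_, ?_, (ih _).mpr ⟨m+1, by omega, by simp at h2; omega, rfl⟩⟩
          rw [List.take_succ_cons,
            join_dot_nil_cons _ (take_ne_nil _ (m+1) (mySplit_ne_nil t) (by omega))]
    · rw [prefix_ne_cons t r hc, mySplit_cons t hc]
      cases hP : mySplit t with
      | nil => exact absurd hP (mySplit_ne_nil t)
      | cons a l =>
        constructor
        · rintro ⟨r', rfl, h⟩
          obtain ⟨n, h1, h2, rfl⟩ := (ih r').mp h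
          rw [hP] at h2 ⊢
          refine ⟨n, h1, by simpa using h2, ?_⟩
          match n, h1 with
          | (m+1), _ =>
            simp only [List.modifyHead, List.take_succ_cons]
            rw [show (c :: a) :: l.take m = ((a :: l.take m).modifyHead (c :: ·)) from rfl,
              join_dot_modifyHead c _ (by simp)]
        · rintro ⟨n, h1, h2, rfl⟩
          refine ⟨PySem.Chars.join ['.'] ((mySplit t).take n), ?_,
            (ih _).mpr ⟨n, h1, by rw [hP]; simpa using h2, rfl⟩⟩
          rw [hP]
          match n, h1 with
          | (m+1), _ =>
            simp only [List.modifyHead, List.take_succ_cons]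
            rw [show (c :: a) :: l.take m = ((a :: l.take m).modifyHead (c :: ·)) from rfl,
              join_dot_modifyHead c _ (by simp)]

-- characterisations of the two ports
theorem altChar (imported : String) (referenced : List String) :
    is_referenced_py_alt imported referenced = true
      ↔ ∃ ref ∈ referenced, imported = ref
          ∨ (imported.toList ++ ['.'] <+: ref.toList)
          ∨ (ref.toList ++ ['.'] <+: imported.toList) := by
  unfold is_referenced_py_alt
  simp only [List.any_eq_true, Bool.or_eq_true, beq_iff_eq,
    PySem.Str.startswith, PySem.Chars.startswith_iff, toList_app_dot]
  constructor
  · rintro ⟨ref, h, hh⟩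
    exact ⟨ref, h, by tauto⟩
  · rintro ⟨ref, h, hh⟩
    exact ⟨ref, h, by tauto⟩

theorem aChar (imported : String) (referenced : List String) :
    is_referenced_py imported referenced = true
      ↔ ∃ ref ∈ referenced, imported = ref
          ∨ (imported.toList ++ ['.'] <+: ref.toList)
          ∨ (ref.toList ++ ['.'] <+: imported.toList) := by
  unfold is_referenced_py
  split_ifs with h1 h2
  · simp only [true_iff]
    exact ⟨imported, List.contains_iff_mem.mp h1, Or.inl rfl⟩
  · simp only [true_iff]
    obtain ⟨ref, hm, hs⟩ := List.any_eq_true.mp h2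
    exact ⟨ref, hm, Or.inr (Or.inl (by
      simpa [PySem.Str.startswith, PySem.Chars.startswith_iff] using hs))⟩
  · rw [List.any_eq_true]
    constructor
    · rintro ⟨i, hi, hc⟩
      obtain ⟨hlo, hhi⟩ := PySem.List.mem_pyRange_one.mp hi
      have hnn : 0 ≤ i := by omega
      obtain ⟨n, rfl⟩ : ∃ n : Nat, i = (n : Int) := ⟨i.toNat, (Int.toNat_of_nonneg hnn).symm⟩
      rw [PySem.List.slice_to_natCast] at hc
      set prefixStr := PySem.Str.join "." (((PySem.Chars.splitOn imported.toList ['.']).map String.ofList).take n) with hps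
      have hmem : prefixStr ∈ referenced := List.contains_iff_mem.mp hc
      refine ⟨prefixStr, hmem, Or.inr (Or.inr ?_)⟩
      have hlen : ((PySem.Chars.splitOn imported.toList ['.']).map String.ofList).length
          = (mySplit imported.toList).length := by
        simp [splitOn_eq_mySplit]
      have hr : prefixStr.toList = PySem.Chars.join ['.'] ((mySplit imported.toList).take n) := by
        rw [hps]
        simp [PySem.Str.join, splitOn_eq_mySplit, ← List.map_take,
          List.map_map, Function.comp_def]
      rw [hr]
      exact (key imported.toList _).mpr ⟨n, by exact_mod_cast hlo,
        by rw [← hlen]; exact_mod_cast hhi, rfl⟩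
    · rintro ⟨ref, hm, (rfl | hpre | hsub)⟩
      · exact absurd (List.contains_iff_mem.mpr hm) (by simpa using h1)
      · exfalso
        apply h2
        refine List.any_eq_true.mpr ⟨ref, hm, ?_⟩
        simp only [PySem.Str.startswith, PySem.Chars.startswith_iff, toList_app_dot]
        exact hpre
      · obtain ⟨n, hn1, hn2, hr⟩ := (key imported.toList _).mp hsub
        refine ⟨(n : Int), PySem.List.mem_pyRange_one.mpr ⟨by exact_mod_cast hn1, ?_⟩, ?_⟩
        · have : ((PySem.Chars.splitOn imported.toList ['.']).map String.ofList).length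
              = (mySplit imported.toList).length := by simp [splitOn_eq_mySplit]
          rw [this]; exact_mod_cast hn2
        · rw [PySem.List.slice_to_natCast]
          apply List.contains_iff_mem.mpr
          have : PySem.Str.join "." (((PySem.Chars.splitOn imported.toList ['.']).map String.ofList).take n) = ref := by
            apply String.toList_inj.mp
            rw [hr]
            simp [PySem.Str.join, splitOn_eq_mySplit, ← List.map_take,
              List.map_map, Function.comp_def]
          rw [this]; exact hm

-- ===== VERDICT (by name: the statement is the Claim_ definition above) =====
theorem is_referenced_py_spec : Claim_equal_is_referenced_py := by
  intro imported referenced _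
  unfold Spec_is_referenced_py
  rw [Bool.eq_iff_iff, aChar, altChar]
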